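-- pv_equiv track=rewrite | github.com/Barlua12/CodePtitPy | chan-le.py | is_valid_number
-- ===== SOURCE A (Python) =====
-- def is_valid_number(n):
--     digit_sum=sum(int(d) for d in str(n))
--     if(digit_sum%10!=0):
--         return  False
--
--     last_digit=None
--     while n>0:
--         current_digit=n%10
--         if last_digit is not None and abs(current_digit-last_digit)!=2:
--             return False
--         last_digit=current_digit
--         n//=10
--     return True
-- ===== SOURCE B (Python) =====
-- def is_valid_number(n):
--     total = 0
--     prev = None
--     for ch in str(n):
--         cur = int(ch)
--         if prev is not None and abs(cur - prev) != 2: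
--             return False
--         total += cur
--         prev = cur
--     return total % 10 == 0
-- ===== Notes on version B (the rewrite author's own statement) =====
-- stated objective: simpler
-- what changed: A makes two passes (a string-comprehension digit sum checked first, then a separate arithmetic while-loop extracting digits with % and // to test adjacent differences); B makes one left-to-right pass over str(n) keeping a running total and the previous digit, failing fast on a bad adjacent pair and doing the digit-sum divisibility test once at the end.
import Mathlib
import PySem

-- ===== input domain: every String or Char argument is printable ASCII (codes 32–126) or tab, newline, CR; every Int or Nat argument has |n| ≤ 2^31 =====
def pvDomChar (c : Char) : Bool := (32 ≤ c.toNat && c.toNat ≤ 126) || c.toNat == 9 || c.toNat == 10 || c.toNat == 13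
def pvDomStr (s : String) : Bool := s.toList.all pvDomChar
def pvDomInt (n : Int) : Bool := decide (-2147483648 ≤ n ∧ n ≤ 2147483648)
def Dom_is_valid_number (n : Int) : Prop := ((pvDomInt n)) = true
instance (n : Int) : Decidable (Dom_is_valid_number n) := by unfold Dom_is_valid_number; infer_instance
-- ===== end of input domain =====

-- B fuses A's two passes (string digit-sum, then an arithmetic adjacent-digit while-loop) into one
-- left-to-right pass over str(n) keeping a running total and the previous digit (objective: simpler).

-- ===== PORT A =====
-- the 'while n > 0' loop of A: current digit by n % 10, step n //= 10
def pvLoopA (n : Int) (last : Option Int) : Bool :=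
  if _h : 0 < n then
    let current := PySem.Int.mod n 10
    match last with
    | some l =>
      if (current - l).natAbs ≠ 2 then false
      else pvLoopA (PySem.Int.floordiv n 10) (some current)
    | none => pvLoopA (PySem.Int.floordiv n 10) (some current)
  else true
termination_by n.toNat
decreasing_by
  all_goals
    rw [PySem.Int.floordiv_eq_ediv_of_pos (by norm_num : (0:Int) < 10)]; omega

def is_valid_number (n : Int) : Bool :=
  -- int(d) for a one-char string d: PySem.Int.ofChars? [d]; it is none only for the '-' of a
  -- negative n (Python raises ValueError there) — excluded by Pre_, so getD 0 is never taken.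
  let digit_sum := ((PySem.Int.toStr n).toList.map (fun d => (PySem.Int.ofChars? [d]).getD 0)).sum
  if PySem.Int.mod digit_sum 10 ≠ 0 then false
  else pvLoopA n none

-- ===== PORT B =====
-- the single for-loop of B over the characters of str(n), state = (total, prev)
def pvLoopB : List Char → Int → Option Int → Bool
  | [], total, _ => decide (PySem.Int.mod total 10 = 0)
  | ch :: rest, total, prev =>
    let cur := (PySem.Int.ofChars? [ch]).getD 0   -- int(ch); none only on '-', excluded by Pre_
    match prev with
    | some p =>
      if (cur - p).natAbs ≠ 2 then false
      else pvLoopB rest (total + cur) (some cur)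
    | none => pvLoopB rest (total + cur) (some cur)

def is_valid_number_alt (n : Int) : Bool :=
  pvLoopB (PySem.Int.toStr n).toList 0 none

-- ===== PRECONDITION & SPEC =====
-- A raises ValueError on every negative n (int('-') on the sign character of str(n)); B raises there too.
def Pre_is_valid_number (n : Int) : Prop := 0 ≤ n
instance (n : Int) : Decidable (Pre_is_valid_number n) := by unfold Pre_is_valid_number; infer_instance
def pvWitness_is_valid_number : Int := (20)

def Spec_is_valid_number (n : Int) (out : Bool) : Prop := out = is_valid_number_alt n
instance (n : Int) (out : Bool) : Decidable (Spec_is_valid_number n out) := by unfold Spec_is_valid_number; infer_instance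

-- ===== CLAIM (what is proved, stated in full; the proofs are below) =====
def Claim_equal_is_valid_number : Prop := ∀ (n : Int), Dom_is_valid_number n → Pre_is_valid_number n → Spec_is_valid_number n (is_valid_number n)

-- ===== LEMMAS AND PROOFS =====

-- adjacency relation on digit values
def pvR (a b : Nat) : Prop := ((a : Int) - (b : Int)).natAbs = 2

-- A's while-loop, abstracted to the LSB-first digit list
def pvOk : List Nat → Option Int → Bool
  | [], _ => true
  | d :: ds, none => pvOk ds (some (d : Int))
  | d :: ds, some l => if ((d : Int) - l).natAbs ≠ 2 then false else pvOk ds (some (d : Int))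

-- B's loop, abstracted to a digit list
def pvOkB : List Nat → Int → Option Int → Bool
  | [], total, _ => decide (PySem.Int.mod total 10 = 0)
  | d :: ds, total, none => pvOkB ds (total + (d : Int)) (some (d : Int))
  | d :: ds, total, some p =>
      if ((d : Int) - p).natAbs ≠ 2 then false else pvOkB ds (total + (d : Int)) (some (d : Int))

lemma pvLoopA_eq (m : Nat) : ∀ last, pvLoopA (m : Int) last = pvOk (Nat.digits 10 m) last := by
  induction m using Nat.strong_induction_on with
  | _ m ih =>
    intro last
    rcases Nat.eq_zero_or_pos m with hm | hm
    · subst hm; rw [pvLoopA]; simp [pvOk]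
    · rw [pvLoopA]
      have hpos : (0 : Int) < (m : Int) := by exact_mod_cast hm
      rw [Nat.digits_def' (by norm_num : 1 < 10) hm]
      have hmod : PySem.Int.mod (m : Int) 10 = ((m % 10 : Nat) : Int) := by
        exact_mod_cast PySem.Int.mod_natCast m 10
      have hdiv : PySem.Int.floordiv (m : Int) 10 = ((m / 10 : Nat) : Int) := by
        exact_mod_cast PySem.Int.floordiv_natCast m 10
      have hlt : m / 10 < m := Nat.div_lt_self hm (by norm_num)
      cases last with
      | none => simp only [hpos, dif_pos, hmod, hdiv, pvOk]; exact ih _ hlt _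
      | some l =>
        simp only [hpos, dif_pos, hmod, hdiv, pvOk]
        split_ifs with hc
        · rfl
        · exact ih _ hlt _

lemma parse_digitChar (d : Nat) (hd : d < 10) :
    (PySem.Int.ofChars? [Nat.digitChar d]).getD 0 = (d : Int) := by
  interval_cases d <;> decide

lemma toDigitsCore_spec : ∀ (fuel m : Nat) (l : List Char), 0 < m → m ≤ fuel →
    Nat.toDigitsCore 10 fuel m l = ((Nat.digits 10 m).map Nat.digitChar).reverse ++ l := by
  intro fuel
  induction fuel with
  | zero => intro m l hm hle; omega
  | succ f ih =>
    intro m l hm hle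
    rw [Nat.toDigitsCore]
    rw [Nat.digits_def' (by norm_num : 1 < 10) hm]
    by_cases h0 : m / 10 = 0
    · simp [h0, Nat.digits_zero]
    · have hlt : m / 10 < m := Nat.div_lt_self hm (by norm_num)
      rw [if_neg h0, ih (m / 10) _ (Nat.pos_of_ne_zero h0) (by omega)]
      simp

lemma toChars_nonneg (m : Nat) :
    PySem.Int.toChars (m : Int) =
      if m = 0 then ['0'] else ((Nat.digits 10 m).map Nat.digitChar).reverse := by
  rcases Nat.eq_zero_or_pos m with hm | hm
  · subst hm; decide
  · have h0 : m ≠ 0 := by omega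
    simp only [PySem.Int.toChars, if_neg (by exact_mod_cast Int.not_lt.mpr (Int.natCast_nonneg m) : ¬ (m:Int) < 0)]
    rw [Int.toNat_natCast, Nat.toDigits, toDigitsCore_spec (m + 1) m [] hm (by omega)]
    simp [h0]

lemma pvLoopB_map (ds : List Nat) (h : ∀ d ∈ ds, d < 10) :
    ∀ total prev, pvLoopB (ds.map Nat.digitChar) total prev = pvOkB ds total prev := by
  induction ds with
  | nil => intro total prev; rfl
  | cons d ds ih =>
    intro total prev
    have hd : d < 10 := h d (by simp)
    have hrest : ∀ x ∈ ds, x < 10 := fun x hx => h x (by simp [hx])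
    cases prev with
    | none =>
      simp only [List.map_cons, pvLoopB, pvOkB, parse_digitChar d hd]
      exact ih hrest _ _
    | some p =>
      simp only [List.map_cons, pvLoopB, pvOkB, parse_digitChar d hd]
      split_ifs with hc
      · rfl
      · exact ih hrest _ _

-- the digit sum as an Int
def pvSum : List Nat → Int
  | [] => 0
  | d :: ds => (d : Int) + pvSum ds

lemma pvOkB_eq (ds : List Nat) :
    ∀ total prev, pvOkB ds total prev =
      (pvOk ds prev && decide (PySem.Int.mod (total + pvSum ds) 10 = 0)) := by
  induction ds with
  | nil => intro total prev; simp [pvOkB, pvOk, pvSum]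
  | cons d ds ih =>
    intro total prev
    cases prev with
    | none =>
      simp only [pvOkB, pvOk, pvSum, ih, ← add_assoc]
    | some p =>
      simp only [pvOkB, pvOk]
      split_ifs with hc
      · simp
      · rw [ih]; simp only [pvSum, ← add_assoc]

lemma pvOk_some_iff (ds : List Nat) : ∀ p : Nat,
    (pvOk ds (some (p : Int)) = true ↔ List.IsChain pvR (p :: ds)) := by
  induction ds with
  | nil => intro p; simp [pvOk]
  | cons d ds ih =>
    intro p
    rw [List.isChain_cons_cons]
    simp only [pvOk]
    split_ifs with hc
    · simp only [false_iff]
      intro hchain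
      exact hc (by have := hchain.1; unfold pvR at this; omega)
    · rw [ih d]
      constructor
      · intro hh; exact ⟨by unfold pvR; omega, hh⟩
      · intro hh; exact hh.2

lemma pvOk_none_iff (ds : List Nat) : pvOk ds none = true ↔ List.IsChain pvR ds := by
  cases ds with
  | nil => simp [pvOk]
  | cons d ds => simpa [pvOk] using pvOk_some_iff ds d

lemma pvOk_reverse (ds : List Nat) : pvOk ds.reverse none = pvOk ds none := by
  have hsymm : (fun a b : Nat => pvR b a) = pvR := by
    funext a b; unfold pvR; simp only [eq_iff_iff]; omega
  rw [Bool.eq_iff_iff, pvOk_none_iff, pvOk_none_iff, List.isChain_reverse, hsymm]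

-- ===== VERDICT (by name: the statement is the Claim_ definition above) =====
lemma map_cast_sum (ds : List Nat) : (ds.map (Nat.cast : Nat → Int)).sum = pvSum ds := by
  induction ds with
  | nil => rfl
  | cons d ds ih => rw [List.map_cons, List.sum_cons, pvSum, ih]

lemma sum_map_reverse {α : Type} (f : α → Int) (l : List α) :
    (l.reverse.map f).sum = (l.map f).sum := by
  rw [List.map_reverse, List.sum_reverse]

lemma pvSum_reverse (ds : List Nat) : pvSum ds.reverse = pvSum ds := by
  have h := sum_map_reverse (Nat.cast : Nat → Int) ds
  rw [map_cast_sum, map_cast_sum] at h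
  exact h

theorem is_valid_number_spec : Claim_equal_is_valid_number := by
  intro n _ hpre
  unfold Spec_is_valid_number
  obtain ⟨m, rfl⟩ : ∃ m : Nat, n = (m : Int) := ⟨n.toNat, (Int.toNat_of_nonneg hpre).symm⟩
  rcases Nat.eq_zero_or_pos m with hm | hm
  · subst hm
    simp only [Nat.cast_zero]
    unfold is_valid_number is_valid_number_alt
    rw [pvLoopA]
    decide
  · have h0 : m ≠ 0 := by omega
    have hdig : ∀ d ∈ Nat.digits 10 m, d < 10 :=
      fun d hd => Nat.digits_lt_base (by norm_num) hd
    have hdigrev : ∀ d ∈ (Nat.digits 10 m).reverse, d < 10 :=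
      fun d hd => hdig d (List.mem_reverse.mp hd)
    unfold is_valid_number is_valid_number_alt
    rw [PySem.Int.toList_toStr, toChars_nonneg, if_neg h0]
    have hmapped :
        ((Nat.digits 10 m).map Nat.digitChar).map (fun d => (PySem.Int.ofChars? [d]).getD 0)
          = (Nat.digits 10 m).map (Nat.cast : Nat → Int) := by
      rw [List.map_map]
      exact List.map_congr_left (fun d hd => parse_digitChar d (hdig d hd))
    have hsum :
        (((Nat.digits 10 m).map Nat.digitChar).reverse.map
            (fun d => (PySem.Int.ofChars? [d]).getD 0)).sum = pvSum (Nat.digits 10 m) := by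
      rw [sum_map_reverse, hmapped, map_cast_sum]
    have hB :
        pvLoopB ((Nat.digits 10 m).map Nat.digitChar).reverse 0 none
          = (pvOk (Nat.digits 10 m) none &&
              decide (PySem.Int.mod (pvSum (Nat.digits 10 m)) 10 = 0)) := by
      rw [← List.map_reverse, pvLoopB_map _ hdigrev, pvOkB_eq, pvOk_reverse, pvSum_reverse,
        zero_add]
    rw [hB, hsum, pvLoopA_eq]
    simp only [ite_not, PySem.Int.mod_eq_zero_iff_dvd]
    by_cases h10 : 10 ∣ pvSum (Nat.digits 10 m) <;> simp [h10]
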